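-- pv_equiv track=rewrite | github.com/MAGICSCIENTIST/species | request_files.py | findFirstTextBeforeTargetText
-- ===== SOURCE A (Python) =====
-- def findFirstTextBeforeTargetText(textList, targetText):
--     lastText = ""
--     for text in textList:
--         if(text is None):
--             continue
--         if targetText in text:
--             return lastText
--         if(text.strip() != ""):
--             lastText = text
--
--     return lastText
-- ===== SOURCE B (Python) =====
-- def findFirstTextBeforeTargetText(textList, targetText):
--     idx = len(textList)
--     for i, t in enumerate(textList):
--         if t is not None and targetText in t:
--             idx = i
--             break
--     for t in reversed(textList[:idx]):
--         if t is not None and t.strip() != "":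
--             return t
--     return ""
-- ===== Notes on version B (the rewrite author's own statement) =====
-- stated objective: alternative
-- what changed: B first locates the target boundary index, then scans the prefix backward for the last non-blank text, instead of A's forward pass carrying a running lastText accumulator.
import Mathlib
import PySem

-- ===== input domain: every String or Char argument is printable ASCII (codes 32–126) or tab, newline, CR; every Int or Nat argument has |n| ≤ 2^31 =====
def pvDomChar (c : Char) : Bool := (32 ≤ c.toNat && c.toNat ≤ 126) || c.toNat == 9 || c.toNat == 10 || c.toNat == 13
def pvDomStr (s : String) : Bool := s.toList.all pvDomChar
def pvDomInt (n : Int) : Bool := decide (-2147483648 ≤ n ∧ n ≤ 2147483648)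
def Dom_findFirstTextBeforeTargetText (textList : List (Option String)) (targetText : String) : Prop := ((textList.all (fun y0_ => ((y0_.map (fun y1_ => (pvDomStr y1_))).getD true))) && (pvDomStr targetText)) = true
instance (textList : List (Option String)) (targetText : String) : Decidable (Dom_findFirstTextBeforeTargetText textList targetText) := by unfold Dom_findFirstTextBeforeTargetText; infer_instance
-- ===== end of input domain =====

-- B changes the decomposition: it first finds the target boundary index, then scans the
-- prefix backwards for the last non-blank text, instead of A's forward accumulator pass.

-- ===== PORT A =====
-- forward loop carrying the running lastText accumulator; early return at the target
def pvGoA (targetText lastText : String) : List (Option String) → String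
  | [] => lastText
  | none :: rest => pvGoA targetText lastText rest
  | some t :: rest =>
      if PySem.Str.isIn targetText t then lastText
      else if PySem.Str.strip t ≠ "" then pvGoA targetText t rest
      else pvGoA targetText lastText rest

def findFirstTextBeforeTargetText (textList : List (Option String)) (targetText : String) : String :=
  pvGoA targetText "" textList

-- ===== PORT B =====
-- first loop of Source B: index of the first non-None element containing targetText (length if none)
def pvBIdx (targetText : String) : List (Option String) → Nat
  | [] => 0
  | none :: rest => 1 + pvBIdx targetText rest
  | some t :: rest => if PySem.Str.isIn targetText t then 0 else 1 + pvBIdx targetText rest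

-- second loop of Source B: first non-None, non-blank element of the (already reversed) prefix
def pvBScan : List (Option String) → String
  | [] => ""
  | none :: rest => pvBScan rest
  | some t :: rest => if PySem.Str.strip t ≠ "" then t else pvBScan rest

def findFirstTextBeforeTargetText_alt (textList : List (Option String)) (targetText : String) : String :=
  pvBScan ((textList.take (pvBIdx targetText textList)).reverse)

-- ===== PRECONDITION & SPEC =====
def Spec_findFirstTextBeforeTargetText (textList : List (Option String)) (targetText : String) (out : String) : Prop := out = findFirstTextBeforeTargetText_alt textList targetText
instance (textList : List (Option String)) (targetText : String) (out : String) : Decidable (Spec_findFirstTextBeforeTargetText textList targetText out) := by unfold Spec_findFirstTextBeforeTargetText; infer_instance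

-- ===== CLAIM (what is proved, stated in full; the proofs are below) =====
def Claim_equal_findFirstTextBeforeTargetText : Prop := ∀ (textList : List (Option String)) (targetText : String), Dom_findFirstTextBeforeTargetText textList targetText → Spec_findFirstTextBeforeTargetText textList targetText (findFirstTextBeforeTargetText textList targetText)

-- ===== LEMMAS AND PROOFS =====

-- proof-side: first non-None non-blank element, as an Option
def pvScanOpt : List (Option String) → Option String
  | [] => none
  | none :: rest => pvScanOpt rest
  | some t :: rest => if PySem.Str.strip t ≠ "" then some t else pvScanOpt rest

theorem pvBScan_eq_scanOpt (xs : List (Option String)) : pvBScan xs = (pvScanOpt xs).getD "" := by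
  induction xs with
  | nil => rfl
  | cons x rest ih =>
      cases x with
      | none => simpa [pvBScan, pvScanOpt] using ih
      | some t =>
          by_cases h : PySem.Str.strip t ≠ ""
          · simp [pvBScan, pvScanOpt, h]
          · simpa [pvBScan, pvScanOpt, h] using ih

theorem pvScanOpt_append (xs ys : List (Option String)) :
    pvScanOpt (xs ++ ys) = ((pvScanOpt xs).orElse (fun _ => pvScanOpt ys)) := by
  induction xs with
  | nil => simp [pvScanOpt]
  | cons x rest ih =>
      cases x with
      | none => simpa [pvScanOpt] using ih
      | some t =>
          by_cases h : PySem.Str.strip t ≠ ""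
          · simp [pvScanOpt, h]
          · simpa [pvScanOpt, h] using ih

theorem pvScanOpt_snoc_none (xs : List (Option String)) :
    pvScanOpt (xs ++ [none]) = pvScanOpt xs := by
  simpa [pvScanOpt] using pvScanOpt_append xs [none]

theorem pvScanOpt_snoc_some (xs : List (Option String)) (t : String) :
    pvScanOpt (xs ++ [some t])
      = match pvScanOpt xs with
        | some y => some y
        | none => if PySem.Str.strip t ≠ "" then some t else none := by
  rw [pvScanOpt_append]
  cases pvScanOpt xs <;> simp [pvScanOpt, Option.orElse]

theorem pvGoA_eq (targetText : String) (l : List (Option String)) :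
    ∀ lastText, pvGoA targetText lastText l
      = (pvScanOpt ((l.take (pvBIdx targetText l)).reverse)).getD lastText := by
  induction l with
  | nil => intro lastText; rfl
  | cons x rest ih =>
      intro lastText
      cases x with
      | none =>
          have htake : List.take (1 + pvBIdx targetText rest) ((none : Option String) :: rest)
              = none :: List.take (pvBIdx targetText rest) rest := by
            rw [Nat.add_comm]; rfl
          rw [pvGoA, show pvBIdx targetText (none :: rest) = 1 + pvBIdx targetText rest from rfl,
            htake, List.reverse_cons, pvScanOpt_snoc_none, ih lastText]
      | some t =>
          by_cases hin : PySem.Str.isIn targetText t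
          · rw [pvGoA]
            simp only [hin, if_true]
            rw [show pvBIdx targetText (some t :: rest) = 0 by
                  simp only [pvBIdx, hin]; rfl]
            rfl
          · have htake : List.take (1 + pvBIdx targetText rest) (some t :: rest)
                = some t :: List.take (pvBIdx targetText rest) rest := by
              rw [Nat.add_comm]; rfl
            rw [pvGoA]
            simp only [hin]
            rw [show pvBIdx targetText (some t :: rest) = 1 + pvBIdx targetText rest by
                  simp only [pvBIdx, hin]; rfl,
              htake, List.reverse_cons, pvScanOpt_snoc_some]
            by_cases hs : PySem.Str.strip t ≠ ""
            · rw [if_pos hs, ih t]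
              cases pvScanOpt ((rest.take (pvBIdx targetText rest)).reverse) <;> simp [hs]
            · rw [if_neg hs, ih lastText]
              cases pvScanOpt ((rest.take (pvBIdx targetText rest)).reverse) <;> simp [hs]

-- ===== VERDICT (by name: the statement is the Claim_ definition above) =====
theorem findFirstTextBeforeTargetText_spec : Claim_equal_findFirstTextBeforeTargetText := by
  intro textList targetText _
  show findFirstTextBeforeTargetText textList targetText = findFirstTextBeforeTargetText_alt textList targetText
  rw [findFirstTextBeforeTargetText, findFirstTextBeforeTargetText_alt, pvGoA_eq,
    pvBScan_eq_scanOpt]
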